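-- pv_equiv track=rewrite | github.com/archime/codewars | primes-in-numbers.py | stringFactors
-- ===== SOURCE A (Python) =====
-- def stringFactors(list_factors):
--     """
--     Takes ordered list, groups into distinct factors, and returns string
--     """
--     output_string = ""
--     distinct_factors = set(list_factors)
--     for factor in sorted(distinct_factors):
--         if list_factors.count(factor) == 1:
--             output_string = output_string + "(" + str(factor) + ")"
--         else:
--             output_string = output_string + "(" + str(factor) + "**" + str(list_factors.count(factor)) + ")"
--     return output_string
-- ===== SOURCE B (Python) =====
-- def _part(x, run):
--     if run == 1:
--         return "(" + str(x) + ")"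
--     return "(" + str(x) + "**" + str(run) + ")"
--
--
-- def stringFactors(list_factors):
--     """
--     Sorts once, then groups equal adjacent values in a single pass,
--     tracking the current value and its run length.
--     """
--     s = sorted(list_factors)
--     if not s:
--         return ""
--     parts = []
--     cur, run = s[0], 1
--     for y in s[1:]:
--         if y == cur:
--             run += 1
--         else:
--             parts.append(_part(cur, run))
--             cur, run = y, 1
--     parts.append(_part(cur, run))
--     return "".join(parts)
-- ===== Notes on version B (the rewrite author's own statement) =====
-- stated objective: faster
-- what changed: Replaces the distinct-set plus repeated list.count rescans (quadratic) by one sort followed by a single linear grouping pass over adjacent equal values, joining per-run pieces.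
import Mathlib
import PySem

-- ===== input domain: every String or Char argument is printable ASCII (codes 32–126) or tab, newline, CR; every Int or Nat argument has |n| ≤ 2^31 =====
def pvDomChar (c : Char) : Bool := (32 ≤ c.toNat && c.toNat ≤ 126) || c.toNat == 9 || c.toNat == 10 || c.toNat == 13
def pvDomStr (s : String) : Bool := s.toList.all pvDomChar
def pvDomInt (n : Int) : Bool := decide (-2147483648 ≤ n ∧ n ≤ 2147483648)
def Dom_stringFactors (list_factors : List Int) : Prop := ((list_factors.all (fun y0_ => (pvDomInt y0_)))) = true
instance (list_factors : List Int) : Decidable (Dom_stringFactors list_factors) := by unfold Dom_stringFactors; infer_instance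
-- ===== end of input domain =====

-- B changes the algorithm: one sort + a single adjacent-grouping pass instead of A's distinct-set with repeated list.count rescans.

-- ===== PORT A =====
def stringFactors (list_factors : List Int) : String :=
  (PySem.List.sorted (PySem.Set.ofList list_factors) (fun x => x) false).foldl
    (fun output_string factor =>
      if PySem.List.count list_factors factor = 1 then
        output_string ++ "(" ++ PySem.Int.toStr factor ++ ")"
      else
        output_string ++ "(" ++ PySem.Int.toStr factor ++ "**" ++
          PySem.Int.toStr (PySem.List.count list_factors factor : Int) ++ ")") ""

-- ===== PORT B =====
-- the piece Source B appends for a value x whose run has length run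
def pvMk (x : Int) (run : Nat) : String :=
  if run = 1 then "(" ++ PySem.Int.toStr x ++ ")"
  else "(" ++ PySem.Int.toStr x ++ "**" ++ PySem.Int.toStr (run : Int) ++ ")"

-- Source B's single pass over the sorted list: current value x, current run length
def pvRun (x : Int) (run : Nat) : List Int → List String
  | [] => [pvMk x run]
  | y :: rest => if y == x then pvRun x (run + 1) rest else pvMk x run :: pvRun y 1 rest

def stringFactors_alt (list_factors : List Int) : String :=
  String.join
    (match PySem.List.sorted list_factors (fun x => x) false with
     | [] => []
     | x :: rest => pvRun x 1 rest)

-- ===== PRECONDITION & SPEC =====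
def Spec_stringFactors (list_factors : List Int) (out : String) : Prop := out = stringFactors_alt list_factors
instance (list_factors : List Int) (out : String) : Decidable (Spec_stringFactors list_factors out) := by unfold Spec_stringFactors; infer_instance

-- ===== CLAIM (what is proved, stated in full; the proofs are below) =====
def Claim_equal_stringFactors : Prop := ∀ (list_factors : List Int), Dom_stringFactors list_factors → Spec_stringFactors list_factors (stringFactors list_factors)

-- ===== LEMMAS AND PROOFS =====

-- run-splitting view of Source B's pass (proof artefact; the port itself is pvRun)
def pvGroupParts : List Int → List String
  | [] => []
  | x :: rest => pvMk x (1 + (rest.takeWhile (· == x)).length) :: pvGroupParts (rest.dropWhile (· == x))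
termination_by l => l.length
decreasing_by
  simp only [List.length_cons]
  exact Nat.lt_succ_of_le (List.length_dropWhile_le _ _)

lemma pvRun_eq (l : List Int) : ∀ (x : Int) (run : Nat),
    pvRun x run l
      = pvMk x (run + (l.takeWhile (· == x)).length) :: pvGroupParts (l.dropWhile (· == x)) := by
  induction l with
  | nil => intro x run; simp [pvRun, pvGroupParts]
  | cons y rest ih =>
    intro x run
    by_cases h : (y == x) = true
    · simp only [pvRun, h, if_pos, List.takeWhile_cons, List.dropWhile_cons, ih]
      congr 2
      simp only [List.length_cons]
      omega
    · have h' : (y == x) = false := by simpa using h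
      simp only [pvRun, h', List.takeWhile_cons, List.dropWhile_cons]
      rw [ih y 1]
      conv_rhs => rw [pvGroupParts.eq_def]
      simp

lemma pvAlt_eq (l : List Int) :
    stringFactors_alt l = String.join (pvGroupParts (PySem.List.sorted l (fun x => x) false)) := by
  rw [stringFactors_alt]
  cases hs : PySem.List.sorted l (fun x => x) false with
  | nil => rw [pvGroupParts]
  | cons x rest =>
    show String.join (pvRun x 1 rest) = _
    rw [pvRun_eq rest x 1, pvGroupParts]

-- adjacent dedup of a list (for sorted input = the sorted distinct values)
def pvAdjDedup : List Int → List Int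
  | [] => []
  | x :: rest => x :: pvAdjDedup (rest.dropWhile (· == x))
termination_by l => l.length
decreasing_by
  simp only [List.length_cons]
  exact Nat.lt_succ_of_le (List.length_dropWhile_le _ _)

lemma pvAdjDedup_subset (s : List Int) : ∀ y ∈ pvAdjDedup s, y ∈ s := by
  induction s using pvAdjDedup.induct with
  | case1 => simp [pvAdjDedup]
  | case2 x rest ih =>
    intro y hy
    rw [pvAdjDedup] at hy
    rcases List.mem_cons.mp hy with h | h
    · simp [h]
    · exact List.mem_cons_of_mem x ((List.dropWhile_sublist _).mem (ih y h))

lemma pvAdjDedup_mem (s : List Int) : ∀ y ∈ s, y ∈ pvAdjDedup s := by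
  induction s using pvAdjDedup.induct with
  | case1 => simp
  | case2 x rest ih =>
    intro y hy
    rw [pvAdjDedup]
    rcases List.mem_cons.mp hy with h | h
    · simp [h]
    · rw [← List.takeWhile_append_dropWhile (p := (· == x)) (l := rest)] at h
      rcases List.mem_append.mp h with h | h
      · have := List.mem_takeWhile_imp h
        simp_all
      · exact List.mem_cons_of_mem x (ih y h)

-- every element surviving dropWhile (· == x) in a sorted tail is strictly above x
lemma pvDropWhile_gt (x : Int) (rest : List Int) (hp : rest.Pairwise (· ≤ ·))
    (hx : ∀ y ∈ rest, x ≤ y) : ∀ y ∈ rest.dropWhile (· == x), x < y := by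
  cases hd : rest.dropWhile (· == x) with
  | nil => intro y hy; simp at hy
  | cons h tt =>
    have hhmem : h ∈ rest := (List.dropWhile_sublist _).subset (by rw [hd]; simp)
    have hhne : ¬ (h == x) = true := by
      have := List.head?_dropWhile_not (· == x) rest
      rw [hd] at this
      simpa using this
    have hxh : x < h := lt_of_le_of_ne (hx h hhmem) (fun he => hhne (beq_iff_eq.mpr he.symm))
    have hpd : (h :: tt).Pairwise (· ≤ ·) := hd ▸ hp.sublist (List.dropWhile_sublist _)
    intro y hy
    rcases List.mem_cons.mp hy with h1 | h1
    · exact h1 ▸ hxh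
    · exact lt_of_lt_of_le hxh ((List.pairwise_cons.mp hpd).1 y h1)

lemma pvAdjDedup_pairwise_lt (s : List Int) (hs : s.Pairwise (· ≤ ·)) :
    (pvAdjDedup s).Pairwise (· < ·) := by
  induction s using pvAdjDedup.induct with
  | case1 => simp [pvAdjDedup]
  | case2 x rest ih =>
    rw [pvAdjDedup, List.pairwise_cons]
    obtain ⟨hx, hp⟩ := List.pairwise_cons.mp hs
    refine ⟨fun y hy => ?_, ih (hp.sublist (List.dropWhile_sublist _))⟩
    exact pvDropWhile_gt x rest hp hx y (pvAdjDedup_subset _ y hy)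

lemma pvGroupParts_eq_map (s : List Int) (hs : s.Pairwise (· ≤ ·)) :
    pvGroupParts s = (pvAdjDedup s).map (fun f => pvMk f (s.count f)) := by
  induction s using pvGroupParts.induct with
  | case1 => simp [pvGroupParts, pvAdjDedup]
  | case2 x rest ih =>
    obtain ⟨hx, hp⟩ := List.pairwise_cons.mp hs
    simp only [pvGroupParts, pvAdjDedup, List.map_cons]
    have hdropx : (rest.dropWhile (· == x)).count x = 0 :=
      List.count_eq_zero.mpr (fun hc => lt_irrefl x (pvDropWhile_gt x rest hp hx x hc))
    have htakex : (rest.takeWhile (· == x)).count x = (rest.takeWhile (· == x)).length :=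
      List.count_eq_length.mpr (fun b hb => by
        have := List.mem_takeWhile_imp hb; simp only [beq_iff_eq] at this; omega)
    have hsplit : ∀ f : Int, rest.count f
        = (rest.takeWhile (· == x)).count f + (rest.dropWhile (· == x)).count f := by
      intro f
      conv_lhs => rw [← List.takeWhile_append_dropWhile (p := (· == x)) (l := rest)]
      rw [List.count_append]
    have hc : (x :: rest).count x = 1 + (rest.takeWhile (· == x)).length := by
      rw [List.count_cons_self, hsplit x, htakex, hdropx]
      omega
    congr 1
    · rw [hc]
    · rw [ih (hp.sublist (List.dropWhile_sublist _))]
      apply List.map_congr_left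
      intro f hf
      have hfx : x < f := pvDropWhile_gt x rest hp hx f (pvAdjDedup_subset _ f hf)
      have htake0 : (rest.takeWhile (· == x)).count f = 0 :=
        List.count_eq_zero.mpr (fun hc2 => by
          have := List.mem_takeWhile_imp hc2; simp only [beq_iff_eq] at this
          exact hfx.ne' this)
      have : (x :: rest).count f = (rest.dropWhile (· == x)).count f := by
        rw [List.count_cons, hsplit f, htake0]
        simp
        exact hfx.ne
      rw [this]

lemma pvFoldlApp (l : List String) (a : String) :
    l.foldl (fun r s => r ++ s) a = a ++ l.foldl (fun r s => r ++ s) "" := by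
  induction l generalizing a with
  | nil => simp
  | cons b l ih =>
    simp only [List.foldl_cons]
    rw [ih (a ++ b), ih ("" ++ b)]
    simp [String.append_assoc]

lemma pvFoldl_mk (d : List Int) (g : Int → String) (acc : String) :
    d.foldl (fun o f => o ++ g f) acc = acc ++ String.join (d.map g) := by
  induction d generalizing acc with
  | nil => simp [String.join]
  | cons a d ih =>
    simp only [List.foldl_cons, List.map_cons, ih, String.join]
    rw [pvFoldlApp (List.map g d) ("" ++ g a)]
    simp [String.append_assoc]

-- ===== VERDICT (by name: the statement is the Claim_ definition above) =====
lemma pvStep_eq (l : List Int) :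
    (fun (output_string : String) (factor : Int) =>
      if PySem.List.count l factor = 1 then
        output_string ++ "(" ++ PySem.Int.toStr factor ++ ")"
      else
        output_string ++ "(" ++ PySem.Int.toStr factor ++ "**" ++
          PySem.Int.toStr (PySem.List.count l factor : Int) ++ ")")
    = fun (o : String) (f : Int) => o ++ pvMk f (l.count f) := by
  funext o f
  simp only [pvMk, PySem.List.count_eq]
  split <;> simp [String.append_assoc]

theorem stringFactors_spec : Claim_equal_stringFactors := by
  intro l _
  unfold Spec_stringFactors stringFactors
  have hsp : (PySem.List.sorted l (fun x => x) false).Pairwise (· ≤ ·) := by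
    have := PySem.List.sorted_pairwise l (fun x => x)
    simpa using this
  set s := PySem.List.sorted l (fun x => x) false with hsdef
  have hperm : s.Perm l := PySem.List.sorted_perm l (fun x => x) false
  have hdedup : PySem.List.sorted (PySem.Set.ofList l) (fun x => x) false = pvAdjDedup s := by
    apply PySem.List.sorted_eq_of_perm_of_pairwise_lt
    · rw [List.perm_ext_iff_of_nodup ((pvAdjDedup_pairwise_lt s hsp).nodup) (PySem.Set.nodup_ofList l)]
      intro a
      constructor
      · intro ha
        have := hperm.mem_iff.mp (pvAdjDedup_subset s a ha)
        simpa [PySem.Set.mem_ofList] using this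
      · intro ha
        exact pvAdjDedup_mem s a (hperm.mem_iff.mpr (by simpa [PySem.Set.mem_ofList] using ha))
    · exact pvAdjDedup_pairwise_lt s hsp
  rw [hdedup, pvStep_eq, pvFoldl_mk]
  have hcnt : (fun f => pvMk f (l.count f)) = fun f => pvMk f (s.count f) := by
    funext f; rw [hperm.count_eq]
  rw [hcnt, ← pvGroupParts_eq_map s hsp, pvAlt_eq l, ← hsdef]
  simp
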